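-- pv_equiv track=rewrite | github.com/Ashiq-am/Path-of-Python | 3.Data Types/Arrays Set 1 and Set 2/Prefix Sum/Maximum difference between sum of even and odd indexed elements of a Subarray/Example 2.py | maximumDiff
-- ===== SOURCE A (Python) =====
-- def pre(arr, i, j):
--     if(i == 0):
--         return arr[j]
--     return arr[j] - arr[i-1]
--
-- def maximumDiff(nums):
--     n = len(nums)
--     val = 0
--     odd = [0] * n
--     even = [0] * n
--     even[0] = nums[0]
--
--     # Loop to create the odd[] and even[] array
--     for i in range(1, n):
--         if(i % 2 == 0):
--             even[i] = nums[i]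
--         else:
--             odd[i] = nums[i]
--         odd[i] += odd[i-1]
--         even[i] += even[i-1]
--
--     # Loop to calculate the maximum possible
--     # difference among all subarrays
--     for i in range(n):
--         for j in range(i, n):
--             sum1 = pre(odd, i, j)
--             sum2 = pre(even, i, j)
--             val = max(val, abs(sum1 - sum2))
--
--     # Return the maximum possible difference
--     return val
-- ===== SOURCE B (Python) =====
-- def maximumDiff(nums):
--     # One pass: D[k] = (odd-indexed sum) - (even-indexed sum) of the first k
--     # elements; the answer is max |D[q] - D[p]| = max(D) - min(D).
--     cur = lo = hi = 0
--     for i, x in enumerate(nums):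
--         cur += x if i % 2 == 1 else -x
--         if cur < lo:
--             lo = cur
--         if cur > hi:
--             hi = cur
--     return hi - lo
-- ===== Notes on version B (the rewrite author's own statement) =====
-- stated objective: faster
-- what changed: Replaces the prefix arrays plus O(n^2) scan over all subarray pairs by a single pass over the signed prefix sums that tracks their running minimum and maximum, returning max-min.
import Mathlib
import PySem

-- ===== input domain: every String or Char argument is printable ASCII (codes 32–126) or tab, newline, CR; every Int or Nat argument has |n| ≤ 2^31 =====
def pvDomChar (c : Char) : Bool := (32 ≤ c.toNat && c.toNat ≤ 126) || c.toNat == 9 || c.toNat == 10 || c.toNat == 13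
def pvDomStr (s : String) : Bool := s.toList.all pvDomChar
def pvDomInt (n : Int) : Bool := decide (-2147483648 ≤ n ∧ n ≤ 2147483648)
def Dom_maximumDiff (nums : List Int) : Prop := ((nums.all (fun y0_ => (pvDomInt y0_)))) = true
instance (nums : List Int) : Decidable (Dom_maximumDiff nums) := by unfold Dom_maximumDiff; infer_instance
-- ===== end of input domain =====

-- B replaces A's O(n^2) scan over all subarray pairs by a single pass over the
-- signed prefix sums tracking their running min and max (asymptotically faster).

-- ===== PORT A =====
-- helper 'pre' of A
def pvPre (arr : List Int) (i j : Int) : Int :=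
  if i = 0 then PySem.List.pyGetD arr j 0
  else PySem.List.pyGetD arr j 0 - PySem.List.pyGetD arr (i - 1) 0

-- body of A's first loop (builds the odd[] and even[] prefix arrays)
def pvBuildStep (nums : List Int) (st : List Int × List Int) (i : Int) : List Int × List Int :=
  let st :=
    if PySem.Int.mod i 2 = 0 then
      (st.1, PySem.List.pySetD st.2 i (PySem.List.pyGetD nums i 0))
    else
      (PySem.List.pySetD st.1 i (PySem.List.pyGetD nums i 0), st.2)
  let odd := PySem.List.pySetD st.1 i (PySem.List.pyGetD st.1 i 0 + PySem.List.pyGetD st.1 (i - 1) 0)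
  let even := PySem.List.pySetD st.2 i (PySem.List.pyGetD st.2 i 0 + PySem.List.pyGetD st.2 (i - 1) 0)
  (odd, even)

def maximumDiff (nums : List Int) : Int :=
  let n : Int := PySem.List.len nums
  let odd : List Int := List.replicate nums.length 0
  let even : List Int := PySem.List.pySetD (List.replicate nums.length 0) 0 (PySem.List.pyGetD nums 0 0)
  let st := (PySem.List.pyRange 1 n 1).foldl (pvBuildStep nums) (odd, even)
  (PySem.List.pyRange 0 n 1).foldl (fun val i =>
    (PySem.List.pyRange i n 1).foldl (fun val j =>
      max val |pvPre st.1 i j - pvPre st.2 i j|) val) 0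

-- ===== PORT B =====
-- body of B's single loop: cur = running signed prefix sum, lo/hi its min/max
def pvBStep (st : Int × Int × Int) (p : Int × Int) : Int × Int × Int :=
  let cur := st.1 + (if PySem.Int.mod p.1 2 = 1 then p.2 else -p.2)
  let lo := if cur < st.2.1 then cur else st.2.1
  let hi := if st.2.2 < cur then cur else st.2.2
  (cur, lo, hi)

def maximumDiff_alt (nums : List Int) : Int :=
  let st := (PySem.List.enumerate nums 0).foldl pvBStep (0, 0, 0)
  st.2.2 - st.2.1

-- ===== PRECONDITION & SPEC =====
-- A reads the first element up front, so it raises IndexError exactly on the empty list.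
def Pre_maximumDiff (nums : List Int) : Prop := nums ≠ []
instance (nums : List Int) : Decidable (Pre_maximumDiff nums) := by unfold Pre_maximumDiff; infer_instance
def pvWitness_maximumDiff : List Int := [1, 2]

def Spec_maximumDiff (nums : List Int) (out : Int) : Prop := out = maximumDiff_alt nums
instance (nums : List Int) (out : Int) : Decidable (Spec_maximumDiff nums out) := by unfold Spec_maximumDiff; infer_instance

-- ===== CLAIM (what is proved, stated in full; the proofs are below) =====
def Claim_equal_maximumDiff : Prop := ∀ (nums : List Int), Dom_maximumDiff nums → Pre_maximumDiff nums → Spec_maximumDiff nums (maximumDiff nums)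

-- ===== LEMMAS AND PROOFS =====

-- P k = (odd-indexed sum) - (even-indexed sum) of the first k elements of nums
def pvP (nums : List Int) : Nat → Int
  | 0 => 0
  | k+1 => pvP nums k + (if k % 2 = 1 then nums.getD k 0 else -(nums.getD k 0))

-- odd[]/even[] array contents after A's build loop
def pvOdd (nums : List Int) : Nat → Int
  | 0 => 0
  | k+1 => pvOdd nums k + (if (k+1) % 2 = 1 then nums.getD (k+1) 0 else 0)

def pvEven (nums : List Int) : Nat → Int
  | 0 => nums.getD 0 0
  | k+1 => pvEven nums k + (if (k+1) % 2 = 1 then 0 else nums.getD (k+1) 0)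

lemma pvOdd_sub_pvEven (nums : List Int) (k : Nat) :
    pvOdd nums k - pvEven nums k = pvP nums (k+1) := by
  induction k with
  | zero => simp [pvOdd, pvEven, pvP]
  | succ k ih =>
    have hP : pvP nums (k+1+1) = pvP nums (k+1) +
        (if (k+1) % 2 = 1 then nums.getD (k+1) 0 else -(nums.getD (k+1) 0)) := rfl
    rw [pvOdd, pvEven, hP, ← ih]
    rcases Nat.mod_two_eq_zero_or_one (k+1) with h | h <;> simp [h] <;> ring

-- generic foldl max/min bounds not in the prelude
lemma pv_foldl_max_le {l : List Int} {a b : Int} (h : a ≤ b) (h2 : ∀ y ∈ l, y ≤ b) :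
    l.foldl max a ≤ b := by
  induction l generalizing a with
  | nil => simpa
  | cons x t ih => exact ih (max_le h (h2 x (by simp))) (fun y hy => h2 y (by simp [hy]))

lemma getD_set_self {l : List Int} {i : Nat} (v : Int) (h : i < l.length) :
    (l.set i v).getD i 0 = v := by
  simp [List.getD_eq_getElem?_getD, List.getElem?_set, h]

lemma getD_set_ne {l : List Int} {i j : Nat} (v : Int) (h : i ≠ j) :
    (l.set i v).getD j 0 = l.getD j 0 := by
  simp [List.getD_eq_getElem?_getD, List.getElem?_set, h]

lemma getD_replicate0 (n j : Nat) : (List.replicate n (0:Int)).getD j 0 = 0 := by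
  simp [List.getD_eq_getElem?_getD, List.getElem?_replicate]
  split <;> rfl

-- min/max over the signed prefix sums P 0 .. P n
def pvMx (nums : List Int) : Int :=
  ((List.range nums.length).map (fun k => pvP nums (k+1))).foldl max 0
def pvMn (nums : List Int) : Int :=
  ((List.range nums.length).map (fun k => pvP nums (k+1))).foldl min 0

-- ===== B side =====
lemma bfold_spec (nums : List Int) : ∀ (d s : Nat) (lo hi : Int), s + d = nums.length →
    (PySem.List.enumerate (nums.drop s) (s : Int)).foldl pvBStep (pvP nums s, lo, hi) =
    (pvP nums nums.length,
     ((List.range d).map (fun k => pvP nums (s+1+k))).foldl min lo,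
     ((List.range d).map (fun k => pvP nums (s+1+k))).foldl max hi) := by
  intro d
  induction d with
  | zero =>
    intro s lo hi hs
    have h0 : nums.drop s = [] := List.drop_eq_nil_of_le (by omega)
    have hsl : s = nums.length := by omega
    simp [h0, PySem.List.enumerate, hsl]
  | succ d ih =>
    intro s lo hi hs
    have hslt : s < nums.length := by omega
    have hdrop : nums.drop s = nums[s] :: nums.drop (s+1) := (List.getElem_cons_drop hslt).symm
    rw [hdrop, PySem.List.enumerate_cons, List.foldl_cons]
    have hgd : nums[s]? = some nums[s] := List.getElem?_eq_getElem hslt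
    have hcur : pvP nums s + (if PySem.Int.mod (s : Int) 2 = 1 then nums[s] else -nums[s]) =
        pvP nums (s+1) := by
      have hmod : PySem.Int.mod (s : Int) 2 = ((s % 2 : Nat) : Int) := by
        exact_mod_cast PySem.Int.mod_natCast s 2
      rw [hmod]
      rcases Nat.mod_two_eq_zero_or_one s with h | h <;> simp [pvP, h, hgd]
    have hstep : pvBStep (pvP nums s, lo, hi) ((s : Int), nums[s]) =
        (pvP nums (s+1), min lo (pvP nums (s+1)), max hi (pvP nums (s+1))) := by
      simp only [pvBStep, hcur, Prod.mk.injEq]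
      refine ⟨trivial, ?_, ?_⟩ <;> split_ifs <;> omega
    rw [hstep]
    have hcast : ((s : Int) + 1) = ((s + 1 : Nat) : Int) := by push_cast; ring
    rw [hcast, ih (s+1) _ _ (by omega)]
    have hmap : (List.range (d+1)).map (fun k => pvP nums (s+1+k)) =
        pvP nums (s+1) :: (List.range d).map (fun k => pvP nums (s+1+1+k)) := by
      rw [List.range_succ_eq_map, List.map_cons, List.map_map]
      refine congrArg₂ _ (by norm_num) (List.map_congr_left fun k _ => by
        show pvP nums (s+1+(k+1)) = pvP nums (s+1+1+k)
        congr 1; omega)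
    rw [hmap, List.foldl_cons, List.foldl_cons]

lemma alt_eq (nums : List Int) : maximumDiff_alt nums = pvMx nums - pvMn nums := by
  have h := bfold_spec nums nums.length 0 0 0 (by omega)
  simp only [Nat.zero_add, List.drop_zero, Nat.cast_zero] at h
  have hP0 : pvP nums 0 = 0 := rfl
  rw [hP0] at h
  have hfun : (fun k => pvP nums (0+1+k)) = (fun k => pvP nums (k+1)) :=
    funext fun k => by congr 1; omega
  rw [hfun] at h
  unfold maximumDiff_alt pvMx pvMn
  rw [h]

-- ===== A side =====
def pvTerms (nums : List Int) (st : List Int × List Int) : List Int :=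
  (PySem.List.pyRange 0 (nums.length : Int) 1).flatMap (fun i =>
    (PySem.List.pyRange i (nums.length : Int) 1).map (fun j =>
      |pvPre st.1 i j - pvPre st.2 i j|))

def pvSt (nums : List Int) : List Int × List Int :=
  (PySem.List.pyRange 1 (nums.length : Int) 1).foldl (pvBuildStep nums)
    (List.replicate nums.length 0,
     PySem.List.pySetD (List.replicate nums.length 0) 0 (PySem.List.pyGetD nums 0 0))

lemma build_inv (nums : List Int) : ∀ (m : Nat), 1 ≤ m → m ≤ nums.length →
    ∀ st, st = (PySem.List.pyRange 1 (m : Int) 1).foldl (pvBuildStep nums)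
      (List.replicate nums.length 0,
       PySem.List.pySetD (List.replicate nums.length 0) 0 (PySem.List.pyGetD nums 0 0)) →
    st.1.length = nums.length ∧ st.2.length = nums.length ∧
    (∀ j : Nat, j < m → st.1.getD j 0 = pvOdd nums j ∧ st.2.getD j 0 = pvEven nums j) ∧
    (∀ j : Nat, m ≤ j → j < nums.length → st.1.getD j 0 = 0 ∧ st.2.getD j 0 = 0) := by
  intro m hm
  induction m, hm using Nat.le_induction with
  | base =>
    intro hlen st hst
    have hr : PySem.List.pyRange 1 ((1:Nat) : Int) 1 = [] := by
      rw [Nat.cast_one]; exact PySem.List.pyRange_one_eq_nil le_rfl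
    rw [hr, List.foldl_nil] at hst
    subst hst
    have hset : PySem.List.pySetD (List.replicate nums.length (0:Int)) 0 (PySem.List.pyGetD nums 0 0) =
        (List.replicate nums.length (0:Int)).set 0 (PySem.List.pyGetD nums 0 0) := by
      rw [PySem.List.pySetD_of_nonneg _ _ le_rfl]; rfl
    refine ⟨by simp, by simp [hset], ?_, ?_⟩
    · intro j hj
      have hj0 : j = 0 := by omega
      subst hj0
      constructor
      · rw [getD_replicate0]; rfl
      · rw [hset, getD_set_self _ (by simp; omega)]
        simp [PySem.List.pyGetD_zero, pvEven]
    · intro j hj hjl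
      exact ⟨getD_replicate0 _ _, by rw [hset, getD_set_ne _ (by omega)]; exact getD_replicate0 _ _⟩
  | succ m hm ih =>
    intro hlen st hst
    obtain ⟨hl1, hl2, hin, hout⟩ := ih (by omega) _ rfl
    set st0 := (PySem.List.pyRange 1 (m : Int) 1).foldl (pvBuildStep nums)
      (List.replicate nums.length 0,
       PySem.List.pySetD (List.replicate nums.length 0) 0 (PySem.List.pyGetD nums 0 0)) with hst0
    have hr : PySem.List.pyRange 1 ((m+1 : Nat) : Int) 1 =
        PySem.List.pyRange 1 (m : Int) 1 ++ [(m : Int)] := by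
      have : ((m+1 : Nat) : Int) = (m : Int) + 1 := by push_cast; ring
      rw [this]; exact PySem.List.pyRange_one_succ_right (by exact_mod_cast hm)
    rw [hr, List.foldl_append, List.foldl_cons, List.foldl_nil] at hst
    rw [← hst0] at hst
    have hmod : PySem.Int.mod ((m : Nat) : Int) 2 = ((m % 2 : Nat) : Int) := by
      exact_mod_cast PySem.Int.mod_natCast m 2
    have hidx : (((m : Nat) : Int) - 1) = ((m - 1 : Nat) : Int) := by omega
    have hm1 : m - 1 < m := by omega
    have hmm : m = (m - 1) + 1 := by omega
    have hmlt : m < nums.length := by omega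
    rcases Nat.mod_two_eq_zero_or_one m with hpar | hpar
    · -- m even: even[m] = nums[m]
      simp only [pvBuildStep, hmod, hpar, hidx, Nat.cast_zero, Nat.cast_one,
        PySem.List.pySetD_natCast, PySem.List.pyGetD_natCast, reduceIte] at hst
      subst hst
      have hw : ∀ j, ((st0.2.set m (nums.getD m 0)).getD j 0) =
          if j = m then nums.getD m 0 else st0.2.getD j 0 := by
        intro j
        by_cases hj : j = m
        · subst hj; rw [getD_set_self _ (by rw [hl2]; omega), if_pos rfl]
        · rw [getD_set_ne _ (Ne.symm hj), if_neg hj]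
      have hOm : pvOdd nums m = pvOdd nums (m-1) := by
        rw [hmm, pvOdd, ← hmm, if_neg (by omega)]; ring
      have hEm : pvEven nums m = pvEven nums (m-1) + nums.getD m 0 := by
        rw [hmm, pvEven, ← hmm, if_neg (by omega)]
      refine ⟨by simpa using hl1, by simpa using hl2, ?_, ?_⟩
      · intro j hj
        by_cases hjm : j = m
        · subst hjm
          refine ⟨?_, ?_⟩
          · rw [getD_set_self _ (by rw [hl1]; omega),
              (hout _ le_rfl (by omega)).1, (hin _ (by omega)).1, hOm]
            ring
          · rw [getD_set_self _ (by simp only [List.length_set]; rw [hl2]; omega),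
              hw, if_pos rfl, hw, if_neg (by omega), (hin _ (by omega)).2, hEm]
            ring
        · have hjlt : j < m := by omega
          refine ⟨?_, ?_⟩
          · rw [getD_set_ne _ (by omega), (hin j hjlt).1]
          · rw [getD_set_ne _ (by omega), hw, if_neg hjm, (hin j hjlt).2]
      · intro j hj hjl
        refine ⟨?_, ?_⟩
        · rw [getD_set_ne _ (by omega), (hout j (by omega) hjl).1]
        · rw [getD_set_ne _ (by omega), hw, if_neg (by omega), (hout j (by omega) hjl).2]
    · -- m odd: odd[m] = nums[m]
      simp only [pvBuildStep, hmod, hpar, hidx, Nat.cast_zero, Nat.cast_one,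
        PySem.List.pySetD_natCast, PySem.List.pyGetD_natCast, reduceIte] at hst
      rw [if_neg (by norm_num : ¬((1:Int) = 0))] at hst
      subst hst
      have hw : ∀ j, ((st0.1.set m (nums.getD m 0)).getD j 0) =
          if j = m then nums.getD m 0 else st0.1.getD j 0 := by
        intro j
        by_cases hj : j = m
        · subst hj; rw [getD_set_self _ (by rw [hl1]; omega), if_pos rfl]
        · rw [getD_set_ne _ (Ne.symm hj), if_neg hj]
      have hOm : pvOdd nums m = pvOdd nums (m-1) + nums.getD m 0 := by
        rw [hmm, pvOdd, ← hmm, if_pos (by omega)]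
      have hEm : pvEven nums m = pvEven nums (m-1) := by
        rw [hmm, pvEven, ← hmm, if_pos (by omega)]; ring
      refine ⟨by simpa using hl1, by simpa using hl2, ?_, ?_⟩
      · intro j hj
        by_cases hjm : j = m
        · subst hjm
          refine ⟨?_, ?_⟩
          · rw [getD_set_self _ (by simp only [List.length_set]; rw [hl1]; omega),
              hw, if_pos rfl, hw, if_neg (by omega), (hin _ (by omega)).1, hOm]
            ring
          · rw [getD_set_self _ (by rw [hl2]; omega),
              (hout _ le_rfl (by omega)).2, (hin _ (by omega)).2, hEm]
            ring
        · have hjlt : j < m := by omega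
          refine ⟨?_, ?_⟩
          · rw [getD_set_ne _ (by omega), hw, if_neg hjm, (hin j hjlt).1]
          · rw [getD_set_ne _ (by omega), (hin j hjlt).2]
      · intro j hj hjl
        refine ⟨?_, ?_⟩
        · rw [getD_set_ne _ (by omega), hw, if_neg (by omega), (hout j (by omega) hjl).1]
        · rw [getD_set_ne _ (by omega), (hout j (by omega) hjl).2]

lemma a_eq_terms (nums : List Int) :
    maximumDiff nums = (pvTerms nums (pvSt nums)).foldl max 0 := by
  simp only [maximumDiff, pvTerms, pvSt, PySem.List.len_eq]
  rw [List.foldl_flatMap]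
  congr 1
  funext acc i
  rw [List.foldl_map]

lemma terms_mem (nums : List Int) (hn : nums ≠ []) :
    (∀ x ∈ pvTerms nums (pvSt nums), ∃ p q : Nat, p < q ∧ q ≤ nums.length ∧ x = |pvP nums q - pvP nums p|) ∧
    (∀ p q : Nat, p < q → q ≤ nums.length → |pvP nums q - pvP nums p| ∈ pvTerms nums (pvSt nums)) := by
  have h1 : 1 ≤ nums.length := List.length_pos_iff.mpr hn
  obtain ⟨hl1, hl2, hin, -⟩ := build_inv nums nums.length h1 le_rfl (pvSt nums) rfl
  have key : ∀ p q : Nat, p ≤ q → q < nums.length →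
      |pvPre (pvSt nums).1 (p : Int) (q : Int) - pvPre (pvSt nums).2 (p : Int) (q : Int)| =
      |pvP nums (q+1) - pvP nums p| := by
    intro p q hpq hqn
    have hOq := (hin q hqn).1
    have hEq := (hin q hqn).2
    rcases Nat.eq_zero_or_pos p with hp0 | hp1
    · subst hp0
      have e1 := pvOdd_sub_pvEven nums q
      have h00 : ((0 : Nat) : Int) = 0 := rfl
      rw [pvPre, pvPre, if_pos h00, if_pos h00]
      simp only [PySem.List.pyGetD_natCast, hOq, hEq]
      rw [show pvP nums 0 = 0 from rfl]
      congr 1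
      omega
    · have hne : ((p : Nat) : Int) ≠ 0 := by exact_mod_cast Nat.pos_iff_ne_zero.mp hp1
      have hidx : (((p : Nat) : Int) - 1) = ((p - 1 : Nat) : Int) := by omega
      have hOp := (hin (p-1) (by omega)).1
      have hEp := (hin (p-1) (by omega)).2
      simp only [pvPre, if_neg hne, hidx, PySem.List.pyGetD_natCast, hOq, hEq, hOp, hEp]
      have e1 := pvOdd_sub_pvEven nums q
      have e2 := pvOdd_sub_pvEven nums (p-1)
      have hpp : p - 1 + 1 = p := by omega
      rw [hpp] at e2
      congr 1
      omega
  constructor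
  · intro x hx
    obtain ⟨i, hi, hx2⟩ := List.mem_flatMap.mp hx
    obtain ⟨hi0, hin'⟩ := PySem.List.mem_pyRange_one.mp hi
    obtain ⟨j, hj, hx3⟩ := List.mem_map.mp hx2
    obtain ⟨hji, hjn⟩ := PySem.List.mem_pyRange_one.mp hj
    refine ⟨i.toNat, j.toNat + 1, by omega, by omega, ?_⟩
    have hic : ((i.toNat : Nat) : Int) = i := by omega
    have hjc : ((j.toNat : Nat) : Int) = j := by omega
    rw [← hic, ← hjc] at hx3
    rw [← hx3, key i.toNat j.toNat (by omega) (by omega)]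
  · intro p q hpq hqn
    apply List.mem_flatMap.mpr
    refine ⟨(p : Int), PySem.List.mem_pyRange_one.mpr ⟨by omega, by omega⟩, ?_⟩
    apply List.mem_map.mpr
    refine ⟨((q - 1 : Nat) : Int), PySem.List.mem_pyRange_one.mpr ⟨by omega, by omega⟩, ?_⟩
    rw [key p (q-1) (by omega) (by omega), show q - 1 + 1 = q by omega]

lemma pvP_le_Mx (nums : List Int) (k : Nat) (hk : k ≤ nums.length) : pvP nums k ≤ pvMx nums := by
  cases k with
  | zero => exact (PySem.List.le_foldl_max _ _).1
  | succ k => exact (PySem.List.le_foldl_max _ _).2 _ (List.mem_map.mpr ⟨k, List.mem_range.mpr (by omega), rfl⟩)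

lemma pvMn_le_pvP (nums : List Int) (k : Nat) (hk : k ≤ nums.length) : pvMn nums ≤ pvP nums k := by
  cases k with
  | zero => exact (PySem.List.foldl_min_le _ _).1
  | succ k => exact (PySem.List.foldl_min_le _ _).2 _ (List.mem_map.mpr ⟨k, List.mem_range.mpr (by omega), rfl⟩)

lemma a_eq (nums : List Int) (hn : nums ≠ []) : maximumDiff nums = pvMx nums - pvMn nums := by
  have h1 : 1 ≤ nums.length := List.length_pos_iff.mpr hn
  have h0 : pvP nums 0 = 0 := rfl
  have hMn0 : pvMn nums ≤ 0 := by have := pvMn_le_pvP nums 0 (by omega); omega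
  have h0Mx : 0 ≤ pvMx nums := by have := pvP_le_Mx nums 0 (by omega); omega
  rw [a_eq_terms nums]
  obtain ⟨hmem, hcont⟩ := terms_mem nums hn
  apply le_antisymm
  · apply pv_foldl_max_le (by omega)
    intro y hy
    obtain ⟨p, q, hpq, hqn, rfl⟩ := hmem y hy
    have h2 := pvP_le_Mx nums q hqn
    have h3 := pvP_le_Mx nums p (by omega)
    have h4 := pvMn_le_pvP nums q hqn
    have h5 := pvMn_le_pvP nums p (by omega)
    refine abs_le.mpr ⟨by omega, by omega⟩
  · have hMx : ∃ q ≤ nums.length, pvMx nums = pvP nums q := by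
      rcases PySem.List.foldl_max_mem ((List.range nums.length).map fun k => pvP nums (k+1)) 0
        with h | h
      · exact ⟨0, by omega, h⟩
      · obtain ⟨k, hk, hkeq⟩ := List.mem_map.mp h
        exact ⟨k+1, by simp at hk; omega, hkeq.symm⟩
    have hMn : ∃ p ≤ nums.length, pvMn nums = pvP nums p := by
      rcases PySem.List.foldl_min_mem ((List.range nums.length).map fun k => pvP nums (k+1)) 0
        with h | h
      · exact ⟨0, by omega, h⟩
      · obtain ⟨k, hk, hkeq⟩ := List.mem_map.mp h
        exact ⟨k+1, by simp at hk; omega, hkeq.symm⟩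
    obtain ⟨q, hqn, hQ⟩ := hMx
    obtain ⟨p, hpn, hP⟩ := hMn
    rcases lt_trichotomy p q with hlt | heq | hgt
    · have hmem' := hcont p q hlt hqn
      have hval : |pvP nums q - pvP nums p| = pvMx nums - pvMn nums := by
        rw [← hQ, ← hP]; exact abs_of_nonneg (by omega)
      rw [← hval]
      exact (PySem.List.le_foldl_max _ _).2 _ hmem'
    · have : pvMx nums - pvMn nums = 0 := by rw [hQ, hP, heq]; ring
      rw [this]
      exact (PySem.List.le_foldl_max _ _).1
    · have hmem' := hcont q p hgt hpn
      have hval : |pvP nums p - pvP nums q| = pvMx nums - pvMn nums := by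
        rw [← hQ, ← hP, abs_sub_comm]; exact abs_of_nonneg (by omega)
      rw [← hval]
      exact (PySem.List.le_foldl_max _ _).2 _ hmem'

-- ===== VERDICT (by name: the statement is the Claim_ definition above) =====
theorem maximumDiff_spec : Claim_equal_maximumDiff := by
  intro nums _ hpre
  unfold Spec_maximumDiff
  rw [a_eq nums hpre, alt_eq nums]
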